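-- pv_equiv track=rewrite | github.com/majaabuhasna/prg-basics | 04-Functions/7-28.py | f
-- ===== SOURCE A (Python) =====
-- def f(dice):
--     max_streak_char = dice[0]
--     max_streak_length = 1
--
--     current_char = dice[0]
--     current_streak_length = 1
--
--     for i in range(1, len(dice)):
--         if dice[i] == current_char:
--             current_streak_length += 1
--         else:
--             if current_streak_length > max_streak_length:
--                 max_streak_length = current_streak_length
--                 max_streak_char = current_char
--
--             current_char = dice[i]
--             current_streak_length = 1
--
--     if current_streak_length > max_streak_length:
--         max_streak_char = current_char
--
--     return int(max_streak_char)
-- ===== SOURCE B (Python) =====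
-- def f(dice):
--     # Decompose into consecutive runs [(char, length)], then take the first run
--     # of maximal length (max with key keeps the earliest, matching A's strict-> rule).
--     runs = []
--     i = 0
--     n = len(dice)
--     while i < n:
--         j = i + 1
--         while j < n and dice[j] == dice[i]:
--             j += 1
--         runs.append((dice[i], j - i))
--         i = j
--     best = max(runs, key=lambda r: r[1])
--     return int(best[0])
-- ===== Notes on version B (the rewrite author's own statement) =====
-- stated objective: alternative
-- what changed: A's single four-variable streak state machine is replaced by a two-phase decomposition: build the list of consecutive runs (char, length) as itertools.groupby would, then pick the earliest maximal run with max(runs, key=length).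
import Mathlib
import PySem

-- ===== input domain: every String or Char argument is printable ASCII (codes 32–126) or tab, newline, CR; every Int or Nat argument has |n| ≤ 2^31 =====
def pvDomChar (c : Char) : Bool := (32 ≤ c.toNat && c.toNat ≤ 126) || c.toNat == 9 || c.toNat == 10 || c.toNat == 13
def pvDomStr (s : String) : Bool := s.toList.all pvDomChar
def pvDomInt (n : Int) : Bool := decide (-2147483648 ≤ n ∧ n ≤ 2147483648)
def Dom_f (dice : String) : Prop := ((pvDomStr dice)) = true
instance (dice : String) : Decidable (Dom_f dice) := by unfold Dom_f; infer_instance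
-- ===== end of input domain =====

-- B replaces A's four-variable running-streak state machine by a runs decomposition
-- (list of (char, run-length) pairs) followed by a first-maximum selection (alternative decomposition, same cost).

-- ===== PORT A =====
-- the for-loop of A: state (max_streak_char, max_streak_length, current_char, current_streak_length)
def fLoop (mC : Char) (mL : Int) (cC : Char) (cL : Int) : List Char → Char × Int × Char × Int
  | [] => (mC, mL, cC, cL)
  | c :: rest =>
    if c == cC then fLoop mC mL cC (cL + 1) rest
    else if cL > mL then fLoop cC cL c 1 rest
    else fLoop mC mL c 1 rest

def f (dice : String) : Int :=
  match dice.toList with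
  | [] => 0   -- dice[0] raises IndexError in Python; excluded by Pre_f
  | c0 :: rest =>
    let st := fLoop c0 1 c0 1 rest
    let mc := if st.2.2.2 > st.2.1 then st.2.2.1 else st.1
    (PySem.Int.ofStr? (String.ofList [mc])).getD 0   -- int(max_streak_char); Pre_f makes it a digit

-- ===== PORT B =====
-- the outer while-loop of Source B: each step consumes one maximal run (the inner while = takeWhile/dropWhile)
def runsOf : List Char → List (Char × Int)
  | [] => []
  | c :: rest =>
    (c, 1 + ((rest.takeWhile (fun x => x == c)).length : Int)) ::
      runsOf (rest.dropWhile (fun x => x == c))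
termination_by l => l.length
decreasing_by
  simp only [List.length_cons]
  exact Nat.lt_succ_of_le (List.length_dropWhile_le _ _)

def f_alt (dice : String) : Int :=
  let runs := runsOf dice.toList
  match PySem.List.max? runs (fun r => r.2) with
  | none => 0   -- empty dice: Python max raises ValueError; excluded by Pre_f
  | some best => (PySem.Int.ofStr? (String.ofList [best.1])).getD 0

-- ===== PRECONDITION & SPEC =====
-- run length of the block of equal characters starting at index i (a spec-side measure, used only by Pre_)
def pvRunAt (l : List Char) (i : Nat) : Nat :=
  ((l.drop i).takeWhile (fun c => c == l.getD i ' ')).length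

-- Pre_ excludes exactly the inputs on which A raises: the empty string (dice[0] is an IndexError) and
-- strings whose earliest longest run is of a non-digit character (int(max_streak_char) is a ValueError).
-- Stated declaratively: some index i starts the earliest maximal run and carries a digit.
def Pre_f (dice : String) : Prop :=
  dice.toList ≠ [] ∧
  ∃ i < dice.toList.length, (dice.toList.getD i ' ').isDigit = true ∧
    (∀ j < dice.toList.length, pvRunAt dice.toList j ≤ pvRunAt dice.toList i) ∧
    (∀ j < i, pvRunAt dice.toList j < pvRunAt dice.toList i)
instance (dice : String) : Decidable (Pre_f dice) := by unfold Pre_f; infer_instance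

def pvWitness_f : String := "1122"

def Spec_f (dice : String) (out : Int) : Prop := out = f_alt dice
instance (dice : String) (out : Int) : Decidable (Spec_f dice out) := by unfold Spec_f; infer_instance

-- ===== CLAIM (what is proved, stated in full; the proofs are below) =====
def Claim_equal_f : Prop := ∀ (dice : String), Dom_f dice → Pre_f dice → Spec_f dice (f dice)

-- ===== LEMMAS AND PROOFS =====

-- direct recursion computing the run decomposition starting from an open run (c, k)
def runsFrom (c : Char) (k : Int) : List Char → List (Char × Int)
  | [] => [(c, k)]
  | x :: rest => if x == c then runsFrom c (k + 1) rest else (c, k) :: runsFrom x 1 rest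

-- first-maximum selection over runs, seeded with a current best
def bestFold (b : Char × Int) (rs : List (Char × Int)) : Char × Int :=
  rs.foldl (fun b r => if b.2 < r.2 then r else b) b

lemma loop_best (l : List Char) : ∀ (mC : Char) (mL : Int) (cC : Char) (cL : Int),
    (if (fLoop mC mL cC cL l).2.2.2 > (fLoop mC mL cC cL l).2.1
      then (fLoop mC mL cC cL l).2.2.1 else (fLoop mC mL cC cL l).1)
      = (bestFold (mC, mL) (runsFrom cC cL l)).1 := by
  induction l with
  | nil =>
    intro mC mL cC cL
    simp only [fLoop, runsFrom, bestFold, List.foldl]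
    by_cases h : cL > mL
    · rw [if_pos h, if_pos (by omega : (mC, mL).2 < (cC, cL).2)]
    · rw [if_neg h, if_neg (by omega : ¬ (mC, mL).2 < (cC, cL).2)]
  | cons c rest ih =>
    intro mC mL cC cL
    by_cases h : c == cC
    · simp only [fLoop, runsFrom, if_pos h]
      exact ih mC mL cC (cL + 1)
    · simp only [fLoop, runsFrom, if_neg h]
      by_cases h2 : cL > mL
      · rw [if_pos h2]
        have : bestFold (mC, mL) ((cC, cL) :: runsFrom c 1 rest)
            = bestFold (cC, cL) (runsFrom c 1 rest) := by
          simp only [bestFold, List.foldl, if_pos (by omega : (mC, mL).2 < (cC, cL).2)]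
        rw [this]; exact ih cC cL c 1
      · rw [if_neg h2]
        have : bestFold (mC, mL) ((cC, cL) :: runsFrom c 1 rest)
            = bestFold (mC, mL) (runsFrom c 1 rest) := by
          simp only [bestFold, List.foldl, if_neg (by omega : ¬ (mC, mL).2 < (cC, cL).2)]
        rw [this]; exact ih mC mL c 1

lemma runsFrom_eq_runsOf (l : List Char) : ∀ (c : Char) (k : Int),
    runsFrom c k l
      = (c, k + ((l.takeWhile (fun x => x == c)).length : Int)) ::
          runsOf (l.dropWhile (fun x => x == c)) := by
  induction l with
  | nil => intro c k; simp [runsFrom, runsOf]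
  | cons x xs ih =>
    intro c k
    by_cases h : x == c
    · simp only [runsFrom, List.takeWhile, List.dropWhile, h]
      rw [ih c (k + 1)]
      simp only [List.length_cons]
      push_cast
      ring_nf
    · simp only [runsFrom, List.takeWhile, List.dropWhile, h]
      simp only [Bool.false_eq_true, if_false, List.length_nil, Nat.cast_zero, add_zero]
      congr 1
      rw [runsOf, ih x 1]

lemma max?_cons_eq (rs : List (Char × Int)) : ∀ (b : Char × Int),
    PySem.List.max? (b :: rs) (fun r => r.2) = some (bestFold b rs) := by
  induction rs with
  | nil => intro b; rfl
  | cons r rs ih =>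
    intro b
    by_cases h : b.2 < r.2
    · have h1 : PySem.List.max? (b :: r :: rs) (fun p : Char × Int => p.2)
          = PySem.List.max? (r :: rs) (fun p : Char × Int => p.2) := by
        simp [PySem.List.max?, h]
      have h2 : bestFold b (r :: rs) = bestFold r rs := by
        simp [bestFold, List.foldl, h]
      rw [h1, h2, ih r]
    · have h1 : PySem.List.max? (b :: r :: rs) (fun p : Char × Int => p.2)
          = PySem.List.max? (b :: rs) (fun p : Char × Int => p.2) := by
        simp [PySem.List.max?, h]
      have h2 : bestFold b (r :: rs) = bestFold b rs := by
        simp [bestFold, List.foldl, h]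
      rw [h1, h2, ih b]

lemma bestFold_absorb (c : Char) (k : Int) (j : Nat) (rs : List (Char × Int)) :
    bestFold (c, k) ((c, k + (j : Int)) :: rs) = bestFold (c, k + (j : Int)) rs := by
  simp only [bestFold, List.foldl]
  by_cases h : (0 : Int) < j
  · rw [if_pos (by omega : (c, k).2 < (c, k + (j : Int)).2)]
  · have hj : (j : Int) = 0 := by omega
    rw [if_neg (by omega : ¬ (c, k).2 < (c, k + (j : Int)).2), hj, add_zero]

-- ===== VERDICT (by name: the statement is the Claim_ definition above) =====
theorem f_spec : Claim_equal_f := by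
  intro dice _ _
  unfold Spec_f f f_alt
  cases hl : dice.toList with
  | nil => simp [runsOf, PySem.List.max?]
  | cons c0 rest =>
    simp only
    rw [loop_best rest c0 1 c0 1]
    rw [runsFrom_eq_runsOf rest c0 1]
    rw [bestFold_absorb c0 1 _ _]
    rw [show runsOf (c0 :: rest) = (c0, 1 + ((rest.takeWhile (fun x => x == c0)).length : Int)) ::
          runsOf (rest.dropWhile (fun x => x == c0)) by rw [runsOf]]
    rw [max?_cons_eq]
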